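-- pv_equiv track=rewrite | github.com/PaulaGarciaMolina/qgan_subspace | src_mps/mps.py | factor_powers_of_two
-- ===== SOURCE A (Python) =====
-- def factor_powers_of_two(shape, n_leading_dims=2):
--     leading = list(shape[:n_leading_dims])
--     trailing = shape[n_leading_dims:]
--
--     factors = []
--     for dim in trailing:
--         if dim & (dim - 1) != 0:
--             raise ValueError(f"Dimension {dim} is not a power of 2.")
--         while dim > 1:
--             factors.append(2)
--             dim //= 2
--     return leading + factors
-- ===== SOURCE B (Python) =====
-- def factor_powers_of_two(shape, n_leading_dims=2):
--     trailing = shape[n_leading_dims:]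
--     for dim in trailing:
--         if dim & (dim - 1) != 0:
--             raise ValueError(f"Dimension {dim} is not a power of 2.")
--     total = sum(max(dim.bit_length() - 1, 0) for dim in trailing)
--     return list(shape[:n_leading_dims]) + [2] * total
-- ===== Notes on version B (the rewrite author's own statement) =====
-- stated objective: simpler
-- what changed: B validates all trailing dims up front, then computes the total number of 2-factors in closed form via bit_length and builds the result with one list multiplication instead of A's per-dimension halving while-loop that appends 2s one at a time.
import Mathlib
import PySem

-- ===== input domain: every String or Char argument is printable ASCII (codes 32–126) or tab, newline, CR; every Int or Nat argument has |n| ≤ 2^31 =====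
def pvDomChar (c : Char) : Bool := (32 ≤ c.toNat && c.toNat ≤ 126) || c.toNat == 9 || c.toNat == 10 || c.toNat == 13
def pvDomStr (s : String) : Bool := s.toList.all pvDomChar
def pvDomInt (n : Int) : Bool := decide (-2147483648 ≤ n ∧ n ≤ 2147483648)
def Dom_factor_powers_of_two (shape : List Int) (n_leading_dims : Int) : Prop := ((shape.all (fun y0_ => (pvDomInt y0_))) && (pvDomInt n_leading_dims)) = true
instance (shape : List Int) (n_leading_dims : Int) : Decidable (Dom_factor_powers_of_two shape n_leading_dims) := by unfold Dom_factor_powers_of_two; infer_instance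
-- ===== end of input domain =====

-- B replaces A's per-dimension halving while-loop by a closed-form bit_length count and one
-- list multiplication (objective: simpler).

-- ===== PORT A =====
-- the inner 'while dim > 1: factors.append(2); dim //= 2' loop
def twosOf (dim : Int) : List Int :=
  if dim > 1 then 2 :: twosOf (PySem.Int.floordiv dim 2) else []
termination_by dim.toNat
decreasing_by
  rw [PySem.Int.floordiv_eq_ediv_of_pos (by omega : (0:Int) < 2)]
  omega

-- the 'dim & (dim-1) != 0' ValueError branch is only reachable outside Pre_ (A raises there)
def factor_powers_of_two (shape : List Int) (n_leading_dims : Int) : List Int :=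
  let leading := PySem.List.slice shape none (some n_leading_dims)
  let trailing := PySem.List.slice shape (some n_leading_dims) none
  let factors := trailing.foldl (fun acc dim => acc ++ twosOf dim) []
  leading ++ factors

-- ===== PORT B =====
-- B raises on exactly the same inputs as A (the same power-of-two check); only reachable outside Pre_
def factor_powers_of_two_alt (shape : List Int) (n_leading_dims : Int) : List Int :=
  let trailing := PySem.List.slice shape (some n_leading_dims) none
  let total := trailing.foldl (fun s dim => s + max ((PySem.Int.bitLength dim : Int) - 1) 0) 0
  PySem.List.slice shape none (some n_leading_dims) ++ List.replicate total.toNat 2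

-- ===== PRECONDITION & SPEC =====
-- Pre_ excludes exactly the inputs on which A raises ValueError: a trailing dim that is not 0 and
-- not a power of two (the exponent bound 31 is forced by Dom's |int| ≤ 2^31).
def Pre_factor_powers_of_two (shape : List Int) (n_leading_dims : Int) : Prop :=
  ∀ d ∈ PySem.List.slice shape (some n_leading_dims) none,
    d = 0 ∨ ∃ k : Nat, k ≤ 31 ∧ d = 2 ^ k

instance (shape : List Int) (n_leading_dims : Int) : Decidable (Pre_factor_powers_of_two shape n_leading_dims) := by
  unfold Pre_factor_powers_of_two; infer_instance

def pvWitness_factor_powers_of_two : List Int × Int := ([3, 5, 8, 1, 4], 2)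

def Spec_factor_powers_of_two (shape : List Int) (n_leading_dims : Int) (out : List Int) : Prop := out = factor_powers_of_two_alt shape n_leading_dims
instance (shape : List Int) (n_leading_dims : Int) (out : List Int) : Decidable (Spec_factor_powers_of_two shape n_leading_dims out) := by unfold Spec_factor_powers_of_two; infer_instance

-- ===== CLAIM (what is proved, stated in full; the proofs are below) =====
def Claim_equal_factor_powers_of_two : Prop := ∀ (shape : List Int) (n_leading_dims : Int), Dom_factor_powers_of_two shape n_leading_dims → Pre_factor_powers_of_two shape n_leading_dims → Spec_factor_powers_of_two shape n_leading_dims (factor_powers_of_two shape n_leading_dims)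

-- ===== LEMMAS AND PROOFS =====

-- per-dimension count
def cnt (d : Int) : Int := max ((PySem.Int.bitLength d : Int) - 1) 0

lemma twosOf_zero : twosOf 0 = [] := by unfold twosOf; simp

lemma twosOf_pow (k : Nat) : twosOf (2 ^ k) = List.replicate k 2 := by
  induction k with
  | zero => unfold twosOf; simp
  | succ n ih =>
    unfold twosOf
    have h1 : ((2:Int) ^ (n+1)) > 1 := by
      have : (1:Int) ≤ 2 ^ n := one_le_pow₀ (by omega)
      rw [pow_succ]; omega
    rw [if_pos h1, PySem.Int.floordiv_eq_ediv_of_pos (by omega : (0:Int) < 2)]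
    have h2 : (2:Int) ^ (n+1) / 2 = 2 ^ n := by rw [pow_succ]; exact Int.mul_ediv_cancel _ (by omega)
    rw [h2, ih, List.replicate_succ]

lemma bitLength_pow (k : Nat) : PySem.Int.bitLength ((2:Int) ^ k) = k + 1 := by
  induction k with
  | zero => decide
  | succ n ih =>
    have h1 : (0:Int) < 2 ^ (n+1) := by positivity
    rw [PySem.Int.bitLength_of_pos h1,
        PySem.Int.floordiv_eq_ediv_of_pos (by omega : (0:Int) < 2)]
    have h2 : (2:Int) ^ (n+1) / 2 = 2 ^ n := by rw [pow_succ]; exact Int.mul_ediv_cancel _ (by omega)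
    rw [h2, ih]

lemma cnt_nonneg (d : Int) : 0 ≤ cnt d := le_max_right _ _

lemma twosOf_eq_replicate (d : Int) (h : d = 0 ∨ ∃ k : Nat, k ≤ 31 ∧ d = 2 ^ k) :
    twosOf d = List.replicate (cnt d).toNat 2 := by
  rcases h with rfl | ⟨k, _, rfl⟩
  · simp [twosOf_zero, cnt]
  · rw [twosOf_pow, cnt, bitLength_pow]
    have : max ((((k:Nat) + 1 : Nat) : Int) - 1) 0 = (k : Int) := by push_cast; omega
    rw [this]; simp

lemma foldl_sum_eq (t : List Int) (s : Int) :
    t.foldl (fun s d => s + cnt d) s = s + (t.map cnt).sum := by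
  induction t generalizing s with
  | nil => simp
  | cons a t ih => simp [List.foldl_cons, ih, List.map_cons]; ring

lemma sum_cnt_nonneg (t : List Int) : 0 ≤ (t.map cnt).sum :=
  List.sum_nonneg (by rintro x hx; simp at hx; obtain ⟨d, _, rfl⟩ := hx; exact cnt_nonneg d)

lemma foldl_app_eq_replicate (t : List Int)
    (h : ∀ d ∈ t, d = 0 ∨ ∃ k : Nat, k ≤ 31 ∧ d = 2 ^ k) (acc : List Int) :
    t.foldl (fun acc dim => acc ++ twosOf dim) acc
      = acc ++ List.replicate ((t.map cnt).sum).toNat 2 := by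
  induction t generalizing acc with
  | nil => simp
  | cons a t ih =>
    rw [List.foldl_cons, ih (fun d hd => h d (List.mem_cons_of_mem a hd)),
        twosOf_eq_replicate a (h a List.mem_cons_self), List.map_cons, List.sum_cons,
        List.append_assoc, ← List.replicate_add]
    congr 2
    have h1 := cnt_nonneg a
    have h2 := sum_cnt_nonneg t
    omega

-- ===== VERDICT (by name: the statement is the Claim_ definition above) =====
theorem factor_powers_of_two_spec : Claim_equal_factor_powers_of_two := by
  intro shape n _ hpre
  unfold Spec_factor_powers_of_two factor_powers_of_two factor_powers_of_two_alt
  simp only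
  rw [foldl_app_eq_replicate _ hpre, List.nil_append]
  have hfun : (fun (s : Int) (dim : Int) => s + max ((PySem.Int.bitLength dim : Int) - 1) 0)
      = (fun s d => s + cnt d) := rfl
  rw [hfun, foldl_sum_eq, zero_add]
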